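-- pv_equiv track=rewrite | github.com/ThoonskiBot/finbro-autotrade-ai | tools/order_cluster_manager.py | cluster_orders
-- ===== SOURCE A (Python) =====
-- def cluster_orders(orders):
--     clusters = {}
--     for order in orders:
--         key = f"{order['ticker']}_{order['strategy']}"
--         if key not in clusters:
--             clusters[key] = []
--         clusters[key].append(order)
--     return clusters
-- ===== SOURCE B (Python) =====
-- def cluster_orders(orders):
--     keys = [f"{o['ticker']}_{o['strategy']}" for o in orders]
--     return {k: [o for o, k2 in zip(orders, keys) if k2 == k]
--             for k in dict.fromkeys(keys)}
-- ===== Notes on version B (the rewrite author's own statement) =====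
-- stated objective: alternative
-- what changed: B precomputes the list of keys, deduplicates it with dict.fromkeys to get the group keys in first-appearance order, and builds each group by filtering the order list, instead of A's single pass that grows a dict of appended lists.
import Mathlib
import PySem

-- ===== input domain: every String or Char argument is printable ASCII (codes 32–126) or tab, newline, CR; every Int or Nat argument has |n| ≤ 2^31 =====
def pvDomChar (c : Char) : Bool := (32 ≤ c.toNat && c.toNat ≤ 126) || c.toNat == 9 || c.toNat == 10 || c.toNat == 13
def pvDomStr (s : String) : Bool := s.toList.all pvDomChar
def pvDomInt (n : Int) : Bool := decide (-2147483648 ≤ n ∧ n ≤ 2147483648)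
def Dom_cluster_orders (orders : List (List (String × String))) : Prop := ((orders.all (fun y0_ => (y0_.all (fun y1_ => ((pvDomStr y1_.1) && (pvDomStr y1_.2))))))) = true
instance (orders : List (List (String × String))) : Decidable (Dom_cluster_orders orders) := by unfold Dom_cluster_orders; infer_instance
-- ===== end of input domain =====

-- B groups by deduplicating the precomputed key list and filtering per key (alternative decomposition, not faster).
-- Pre_ excludes orders missing a 'ticker' or 'strategy' field, on which the Python A raises KeyError.

-- ===== PORT A =====
-- shared helper: the key expression f"{order['ticker']}_{order['strategy']}" (total form of the lookup; Pre_ guarantees both fields are present)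
def pvKey (order : List (String × String)) : String :=
  (PySem.Dict.mk order).getD "ticker" "" ++ "_" ++ (PySem.Dict.mk order).getD "strategy" ""

def cluster_orders (orders : List (List (String × String))) : List (String × List (List (String × String))) :=
  (orders.foldl
    (fun (clusters : PySem.Dict String (List (List (String × String)))) order =>
      let key := pvKey order
      let clusters := if clusters.contains key then clusters else clusters.insert key []
      clusters.modify key [] (fun g => g ++ [order]))
    PySem.Dict.empty).items

-- ===== PORT B =====
def cluster_orders_alt (orders : List (List (String × String))) : List (String × List (List (String × String))) :=
  let keys := orders.map pvKey
  (PySem.List.dedup keys).map (fun k =>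
    (k, ((orders.zip keys).filter (fun p => p.2 == k)).map (fun p => p.1)))

-- ===== PRECONDITION & SPEC =====
-- Pre_ excludes exactly the inputs where some order lacks a 'ticker' or 'strategy' key: there Python A raises KeyError.
def Pre_cluster_orders (orders : List (List (String × String))) : Prop :=
  (orders.all (fun o => (PySem.Dict.mk o).contains "ticker" && (PySem.Dict.mk o).contains "strategy")) = true
instance (orders : List (List (String × String))) : Decidable (Pre_cluster_orders orders) := by unfold Pre_cluster_orders; infer_instance

def pvWitness_cluster_orders : (List (List (String × String))) :=
  [[("ticker", "AAPL"), ("strategy", "momo")], [("ticker", "MSFT"), ("strategy", "rev")], [("ticker", "AAPL"), ("strategy", "momo")]]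

def Spec_cluster_orders (orders : List (List (String × String))) (out : List (String × List (List (String × String)))) : Prop := out = cluster_orders_alt orders
instance (orders : List (List (String × String))) (out : List (String × List (List (String × String)))) : Decidable (Spec_cluster_orders orders out) := by unfold Spec_cluster_orders; infer_instance

-- ===== CLAIM (what is proved, stated in full; the proofs are below) =====
def Claim_equal_cluster_orders : Prop := ∀ (orders : List (List (String × String))), Dom_cluster_orders orders → Pre_cluster_orders orders → Spec_cluster_orders orders (cluster_orders orders)

-- ===== LEMMAS AND PROOFS =====

-- the loop body of A, as a named function
def pvStep (d : PySem.Dict String (List (List (String × String)))) (order : List (String × String)) :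
    PySem.Dict String (List (List (String × String))) :=
  let key := pvKey order
  let d := if d.contains key then d else d.insert key []
  d.modify key [] (fun g => g ++ [order])

lemma pvStep_keys (d : PySem.Dict String (List (List (String × String)))) (o : List (String × String)) :
    (pvStep d o).keys = PySem.Set.add d.keys (pvKey o) := by
  unfold pvStep
  by_cases h : d.contains (pvKey o) = true
  · have hk : pvKey o ∈ d.keys := (PySem.Dict.contains_iff_mem_keys d (pvKey o)).mp h
    simp [h, PySem.Dict.keys_modify, PySem.Dict.keys_insert_of_contains _ _ h, PySem.Set.add, hk]
  · have h' : d.contains (pvKey o) = false := by simpa using h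
    simp only [h', Bool.false_eq_true, if_false]
    rw [PySem.Dict.keys_modify,
        PySem.Dict.keys_insert_of_contains _ _ (PySem.Dict.contains_insert_self d _ _),
        PySem.Dict.keys_insert_of_not_contains _ _ h']
    have hk : pvKey o ∉ d.keys := fun hm => by
      simp [(PySem.Dict.contains_iff_mem_keys d (pvKey o)).mpr hm] at h'
    simp [PySem.Set.add, hk]

lemma pvStep_getD (d : PySem.Dict String (List (List (String × String)))) (o : List (String × String)) (k : String) :
    (pvStep d o).getD k [] = if k = pvKey o then d.getD (pvKey o) [] ++ [o] else d.getD k [] := by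
  unfold pvStep
  by_cases h : d.contains (pvKey o) = true
  · simp [h, PySem.Dict.getD_modify]
  · have h' : d.contains (pvKey o) = false := by simpa using h
    simp only [h', Bool.false_eq_true, if_false]
    rw [PySem.Dict.getD_modify]
    by_cases hk : k = pvKey o
    · simp [hk, PySem.Dict.getD_of_not_contains d _ h']
    · simp [hk, PySem.Dict.getD_insert]

lemma pvFold_keys (orders : List (List (String × String))) (d : PySem.Dict String (List (List (String × String)))) :
    (orders.foldl pvStep d).keys = PySem.Set.update d.keys (orders.map pvKey) := by
  induction orders generalizing d with
  | nil => rfl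
  | cons o os ih => simp [List.foldl_cons, ih, pvStep_keys, PySem.Set.update]

lemma pvUpdate_nil (l : List String) : PySem.Set.update ([] : PySem.Set String) l = PySem.Set.ofList l := by
  rw [PySem.Set.ofList_eq_foldl]; rfl

lemma pvFold_getD (orders : List (List (String × String))) (d : PySem.Dict String (List (List (String × String)))) (k : String) :
    (orders.foldl pvStep d).getD k [] = d.getD k [] ++ orders.filter (fun o => pvKey o == k) := by
  induction orders generalizing d with
  | nil => simp
  | cons o os ih =>
    simp only [List.foldl_cons, ih, pvStep_getD, List.filter_cons]
    by_cases h : pvKey o = k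
    · subst h; simp
    · have : ¬ k = pvKey o := fun hh => h hh.symm
      simp [h, this]

lemma pvZip_filter (orders : List (List (String × String))) (k : String) :
    ((orders.zip (orders.map pvKey)).filter (fun p => p.2 == k)).map (fun p => p.1) =
      orders.filter (fun o => pvKey o == k) := by
  induction orders with
  | nil => rfl
  | cons o os ih =>
    simp only [List.map_cons, List.zip_cons_cons, List.filter_cons]
    by_cases h : pvKey o == k
    · simp [h, ih]
    · simp only [h] at *
      simp [ih]

lemma pvB_eq (orders : List (List (String × String))) :
    cluster_orders_alt orders =
      (PySem.List.dedup (orders.map pvKey)).map (fun k => (k, orders.filter (fun o => pvKey o == k))) := by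
  unfold cluster_orders_alt
  show (PySem.List.dedup (orders.map pvKey)).map (fun k =>
      (k, ((orders.zip (orders.map pvKey)).filter (fun p => p.2 == k)).map (fun p => p.1))) = _
  refine List.map_congr_left fun k _ => ?_
  rw [pvZip_filter]

lemma pvA_eq (orders : List (List (String × String))) :
    cluster_orders orders =
      (PySem.Set.ofList (orders.map pvKey)).map (fun k => (k, orders.filter (fun o => pvKey o == k))) := by
  have hA : cluster_orders orders = (orders.foldl pvStep PySem.Dict.empty).items := rfl
  have hkeys : (orders.foldl pvStep PySem.Dict.empty).keys = PySem.Set.ofList (orders.map pvKey) := by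
    rw [pvFold_keys]
    simpa using pvUpdate_nil (orders.map pvKey)
  have hnd : (orders.foldl pvStep PySem.Dict.empty).keys.Nodup := by
    rw [hkeys]; exact PySem.Set.nodup_ofList _
  rw [hA, PySem.Dict.items_eq_map_keys _ hnd [], hkeys]
  refine List.map_congr_left fun k _ => ?_
  rw [pvFold_getD]
  simp

-- ===== VERDICT (by name: the statement is the Claim_ definition above) =====
theorem cluster_orders_spec : Claim_equal_cluster_orders := by
  intro orders _ _
  unfold Spec_cluster_orders
  rw [pvB_eq, PySem.List.dedup_eq_ofList, pvA_eq]
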